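-- pv_equiv track=rewrite | github.com/etakerim/DNA-transfer | dna-transfer.py | smiles_cykly
-- ===== SOURCE A (Python) =====
-- aminokyseliny = {
--     'A': ('Alanin'              ,'NC(C)C(=O)O'         ),
--     ' ': ('STOP'                ,''                    ),
--     'C': ('Cystein'             ,'NC(C(=O)O)CS'        ),
--     'D': ('Kyselina asparagova' ,'NC(C(=O)O)CC(=O)O'   ),
--     'E': ('Kyselina glutamova'  ,'NC(C(=O)O)CCC(=O)O'  ),
--     'F': ('Fenylalanin'         ,'NC(C(=O)O)Cc1ccccc1' ),
--     'G': ('Glycin'              ,'NCC(=O)O'            ),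
--     'H': ('Histidin'            ,'NC(C(=O)O)CC1=CN=CN1'),
--     'I': ('Izoleucin'           ,'NC(C(=O)O)C(C)CC'    ),
--     'K': ('Lyzin'               ,'N(C(=O)O)CCCCN'      ),
--     'L': ('Leucin'              ,'NC(C(=O)O)CC(C)C'    ),
--     'M': ('Metionin - S'        ,'NC(C(=O)O)CCSC'      ),
--     'N': ('Asparagin'           ,'NC(=O)CC(N)C(=O)O'   ),
--     'P': ('Prolin'              ,'N1CCCC1C(=O)O'       ),
--     'Q': ('Glutamin'            ,'NC(=O)CCC(N)C(=O)O'  ),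
--     'R': ('Arginin'             ,'NC(CCCNC(N)=N)C(=O)O'),
--     'S': ('Serin'               ,'NC(C(=O)O)CO'        ),
--     'T': ('Treonin'             ,'NC(C(=O)O)C(O)C'     ),
--     'V': ('Valin'               ,'NC(C(=O)O)C(C)C'     ),
--     'W': ('Tryptofan'      ,'NC(C(=O)O)CC1=CNc2ccccc12'),
--     'Y': ('Tyrozin'           ,'NC(Cc1ccc(O)cc1)C(=O)O')
-- }
--
-- def smiles_cykly(pocitadlo, ak):
--     ak_nova = ''
--     je_cyklus = False
--     for c in aminokyseliny[ak][1]: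
--         if c == '1' or c == '2':
--             t = pocitadlo if c == '1' else pocitadlo + 1
--             je_cyklus = True
--             if pocitadlo < 10:
--                 num = '{}'.format(t)
--             else:
--                 num = '%{}'.format(t)
--             ak_nova += num
--         else:
--             ak_nova += c
--     if je_cyklus:
--         pocitadlo += 1
--
--     return (pocitadlo, ak_nova)
-- ===== SOURCE B (Python) =====
-- aminokyseliny = {
--     'A': ('Alanin'              ,'NC(C)C(=O)O'         ),
--     ' ': ('STOP'                ,''                    ),
--     'C': ('Cystein'             ,'NC(C(=O)O)CS'        ),
--     'D': ('Kyselina asparagova' ,'NC(C(=O)O)CC(=O)O'   ),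
--     'E': ('Kyselina glutamova'  ,'NC(C(=O)O)CCC(=O)O'  ),
--     'F': ('Fenylalanin'         ,'NC(C(=O)O)Cc1ccccc1' ),
--     'G': ('Glycin'              ,'NCC(=O)O'            ),
--     'H': ('Histidin'            ,'NC(C(=O)O)CC1=CN=CN1'),
--     'I': ('Izoleucin'           ,'NC(C(=O)O)C(C)CC'    ),
--     'K': ('Lyzin'               ,'N(C(=O)O)CCCCN'      ),
--     'L': ('Leucin'              ,'NC(C(=O)O)CC(C)C'    ),
--     'M': ('Metionin - S'        ,'NC(C(=O)O)CCSC'      ),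
--     'N': ('Asparagin'           ,'NC(=O)CC(N)C(=O)O'   ),
--     'P': ('Prolin'              ,'N1CCCC1C(=O)O'       ),
--     'Q': ('Glutamin'            ,'NC(=O)CCC(N)C(=O)O'  ),
--     'R': ('Arginin'             ,'NC(CCCNC(N)=N)C(=O)O'),
--     'S': ('Serin'               ,'NC(C(=O)O)CO'        ),
--     'T': ('Treonin'             ,'NC(C(=O)O)C(O)C'     ),
--     'V': ('Valin'               ,'NC(C(=O)O)C(C)C'     ),
--     'W': ('Tryptofan'      ,'NC(C(=O)O)CC1=CNc2ccccc12'),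
--     'Y': ('Tyrozin'           ,'NC(Cc1ccc(O)cc1)C(=O)O')
-- }
--
-- def smiles_cykly(pocitadlo, ak):
--     s = aminokyseliny[ak][1]
--     je_cyklus = '1' in s or '2' in s
--     fmt = '{}' if pocitadlo < 10 else '%{}'
--     table = {ord('1'): fmt.format(pocitadlo), ord('2'): fmt.format(pocitadlo + 1)}
--     return (pocitadlo + 1 if je_cyklus else pocitadlo, s.translate(table))
-- ===== Notes on version B (the rewrite author's own statement) =====
-- stated objective: idiomatic
-- what changed: Replaces A's character-by-character loop with mutable accumulator and flag by the idiomatic translate-table formulation: the two replacement number strings are computed once, je_cyklus is tested with 'in', and the string is rewritten in a single str.translate call.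
-- outside the precondition, e.g. on smiles_cykly(0, 'X'): A raises KeyError, B raises KeyError
import Mathlib
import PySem

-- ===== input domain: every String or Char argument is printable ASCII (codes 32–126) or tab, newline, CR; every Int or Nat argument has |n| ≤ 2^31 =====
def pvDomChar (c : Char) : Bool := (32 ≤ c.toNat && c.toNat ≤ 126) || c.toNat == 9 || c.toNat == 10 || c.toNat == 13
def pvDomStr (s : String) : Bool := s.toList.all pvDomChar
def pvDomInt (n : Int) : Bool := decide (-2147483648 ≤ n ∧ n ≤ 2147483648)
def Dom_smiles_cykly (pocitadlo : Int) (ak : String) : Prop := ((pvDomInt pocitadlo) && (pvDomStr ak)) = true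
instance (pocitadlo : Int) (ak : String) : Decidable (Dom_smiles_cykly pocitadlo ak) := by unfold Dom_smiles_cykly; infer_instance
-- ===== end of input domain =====

-- B rewrites A's per-character loop as a translate-table formulation: the two replacement
-- strings are computed once and the SMILES string is translated in one map; objective: idiomatic.
-- Pre_ excludes keys absent from the table, on which the Python A raises KeyError.

def aminokyseliny : PySem.Dict String (String × String) := PySem.Dict.ofList [
  ("A", ("Alanin"              , "NC(C)C(=O)O"         )),
  (" ", ("STOP"                , ""                    )),
  ("C", ("Cystein"             , "NC(C(=O)O)CS"        )),
  ("D", ("Kyselina asparagova" , "NC(C(=O)O)CC(=O)O"   )),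
  ("E", ("Kyselina glutamova"  , "NC(C(=O)O)CCC(=O)O"  )),
  ("F", ("Fenylalanin"         , "NC(C(=O)O)Cc1ccccc1" )),
  ("G", ("Glycin"              , "NCC(=O)O"            )),
  ("H", ("Histidin"            , "NC(C(=O)O)CC1=CN=CN1")),
  ("I", ("Izoleucin"           , "NC(C(=O)O)C(C)CC"    )),
  ("K", ("Lyzin"               , "N(C(=O)O)CCCCN"      )),
  ("L", ("Leucin"              , "NC(C(=O)O)CC(C)C"    )),
  ("M", ("Metionin - S"        , "NC(C(=O)O)CCSC"      )),
  ("N", ("Asparagin"           , "NC(=O)CC(N)C(=O)O"   )),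
  ("P", ("Prolin"              , "N1CCCC1C(=O)O"       )),
  ("Q", ("Glutamin"            , "NC(=O)CCC(N)C(=O)O"  )),
  ("R", ("Arginin"             , "NC(CCCNC(N)=N)C(=O)O")),
  ("S", ("Serin"               , "NC(C(=O)O)CO"        )),
  ("T", ("Treonin"             , "NC(C(=O)O)C(O)C"     )),
  ("V", ("Valin"               , "NC(C(=O)O)C(C)C"     )),
  ("W", ("Tryptofan"      , "NC(C(=O)O)CC1=CNc2ccccc12")),
  ("Y", ("Tyrozin"           , "NC(Cc1ccc(O)cc1)C(=O)O"))]

-- ===== PORT A =====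
-- the for-loop of A: state = (ak_nova as List Char, je_cyklus)
def smilesLoopA (pocitadlo : Int) : List Char → List Char × Bool → List Char × Bool
  | [], st => st
  | c :: rest, (acc, je) =>
    if c = '1' ∨ c = '2' then
      let t : Int := if c = '1' then pocitadlo else pocitadlo + 1
      let num : String := if pocitadlo < 10 then PySem.Int.toStr t else "%" ++ PySem.Int.toStr t
      smilesLoopA pocitadlo rest (acc ++ num.toList, true)
    else
      smilesLoopA pocitadlo rest (acc ++ [c], je)

def smiles_cykly (pocitadlo : Int) (ak : String) : Int × String :=
  match aminokyseliny.get? ak with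
  | none => (0, "")   -- KeyError in Python; excluded by Pre_
  | some v =>
    let (acc, je_cyklus) := smilesLoopA pocitadlo v.2.toList ([], false)
    (if je_cyklus then pocitadlo + 1 else pocitadlo, String.mk acc)

-- ===== PORT B =====
-- translate-table formulation: one map over the characters with two precomputed strings
def smiles_cykly_alt (pocitadlo : Int) (ak : String) : Int × String :=
  match aminokyseliny.get? ak with
  | none => (0, "")   -- KeyError in Python; excluded by Pre_
  | some v =>
    let s := v.2.toList
    let je_cyklus := s.contains '1' || s.contains '2'
    let num1 : String := if pocitadlo < 10 then PySem.Int.toStr pocitadlo else "%" ++ PySem.Int.toStr pocitadlo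
    let num2 : String := if pocitadlo < 10 then PySem.Int.toStr (pocitadlo + 1) else "%" ++ PySem.Int.toStr (pocitadlo + 1)
    let out := String.mk (s.flatMap (fun c => if c = '1' then num1.toList else if c = '2' then num2.toList else [c]))
    (if je_cyklus then pocitadlo + 1 else pocitadlo, out)

-- ===== PRECONDITION & SPEC =====
-- Pre_ excludes only the ak not in the amino-acid table, on which Python A raises KeyError.
def Pre_smiles_cykly (pocitadlo : Int) (ak : String) : Prop :=
  (aminokyseliny.contains ak) = true
instance (pocitadlo : Int) (ak : String) : Decidable (Pre_smiles_cykly pocitadlo ak) := by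
  unfold Pre_smiles_cykly; infer_instance

def pvWitness_smiles_cykly : Int × String := (3, "W")

def Spec_smiles_cykly (pocitadlo : Int) (ak : String) (out : Int × String) : Prop := out = smiles_cykly_alt pocitadlo ak
instance (pocitadlo : Int) (ak : String) (out : Int × String) : Decidable (Spec_smiles_cykly pocitadlo ak out) := by unfold Spec_smiles_cykly; infer_instance

-- ===== CLAIM (what is proved, stated in full; the proofs are below) =====
def Claim_equal_smiles_cykly : Prop := ∀ (pocitadlo : Int) (ak : String), Dom_smiles_cykly pocitadlo ak → Pre_smiles_cykly pocitadlo ak → Spec_smiles_cykly pocitadlo ak (smiles_cykly pocitadlo ak)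

-- ===== LEMMAS AND PROOFS =====

-- A's loop is B's flatMap together with the contains-flag
theorem smilesLoopA_eq (pocitadlo : Int) (l : List Char) :
    ∀ (acc : List Char) (je : Bool),
      smilesLoopA pocitadlo l (acc, je) =
        (acc ++ l.flatMap (fun c =>
            if c = '1' then (if pocitadlo < 10 then PySem.Int.toStr pocitadlo else "%" ++ PySem.Int.toStr pocitadlo).toList
            else if c = '2' then (if pocitadlo < 10 then PySem.Int.toStr (pocitadlo + 1) else "%" ++ PySem.Int.toStr (pocitadlo + 1)).toList
            else [c]),
         je || (l.contains '1' || l.contains '2')) := by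
  induction l with
  | nil => intro acc je; simp [smilesLoopA]
  | cons c rest ih =>
    intro acc je
    by_cases h1 : c = '1'
    · subst h1
      simp [smilesLoopA, ih]
    · by_cases h2 : c = '2'
      · subst h2
        simp [smilesLoopA, ih]
      · simp [smilesLoopA, h1, h2, Ne.symm h1, Ne.symm h2, ih]

-- ===== VERDICT (by name: the statement is the Claim_ definition above) =====
theorem smiles_cykly_spec : Claim_equal_smiles_cykly := by
  intro pocitadlo ak _ _
  unfold Spec_smiles_cykly smiles_cykly smiles_cykly_alt
  cases h : aminokyseliny.get? ak with
  | none => rfl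
  | some v =>
    simp only [smilesLoopA_eq, List.nil_append, Bool.false_or]
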